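-- pv_equiv track=rewrite | github.com/maxproshees/compci | assingment2.py | find_best_dimensions
-- ===== SOURCE A (Python) =====
-- import math
--
-- def find_best_dimensions(total_photos):
--     # Initialize the best perimeter to None for comparison
--     best_perimeter = None
--     # Start with default layout of 1 row x total_photos columns
--     best_dimensions = (1, total_photos)
--
--     # Check divisors of total_photos to find possible row and column combinations
--     for rows in range(1, int(math.sqrt(total_photos)) + 1):
--         # Rows must divide total_photos evenly
--         if total_photos % rows == 0:
--             columns = total_photos // rows
--             # Calculate perimeter for current layout
--             perimeter = 2 * (rows + columns)
--
--             # Update the best perimeter and dimensions if this perimeter is smaller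
--             if best_perimeter is None or perimeter < best_perimeter:
--                 best_perimeter = perimeter
--                 best_dimensions = (rows, columns)
--
--     return best_dimensions, best_perimeter
-- ===== SOURCE B (Python) =====
-- import math
--
-- def find_best_dimensions(total_photos):
--     # The perimeter 2*(rows + total_photos//rows) strictly decreases as the
--     # divisor rows grows on (0, sqrt(total_photos)], so the best layout is the
--     # LARGEST divisor <= isqrt(total_photos): scan downward and return the
--     # first divisor found.
--     for rows in range(math.isqrt(total_photos), 0, -1):
--         if total_photos % rows == 0:
--             columns = total_photos // rows
--             return (rows, columns), 2 * (rows + columns)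
-- ===== Notes on version B (the rewrite author's own statement) =====
-- stated objective: simpler
-- what changed: B replaces A's ascending divisor scan with a running-minimum state by a descending scan from isqrt(n) that returns the first divisor found (the largest divisor <= sqrt(n)), valid because the perimeter is strictly decreasing in rows on (0, sqrt(n)].
-- outside the precondition, e.g. on find_best_dimensions(0): A returns ((1, 0), None), B returns None
import Mathlib
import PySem

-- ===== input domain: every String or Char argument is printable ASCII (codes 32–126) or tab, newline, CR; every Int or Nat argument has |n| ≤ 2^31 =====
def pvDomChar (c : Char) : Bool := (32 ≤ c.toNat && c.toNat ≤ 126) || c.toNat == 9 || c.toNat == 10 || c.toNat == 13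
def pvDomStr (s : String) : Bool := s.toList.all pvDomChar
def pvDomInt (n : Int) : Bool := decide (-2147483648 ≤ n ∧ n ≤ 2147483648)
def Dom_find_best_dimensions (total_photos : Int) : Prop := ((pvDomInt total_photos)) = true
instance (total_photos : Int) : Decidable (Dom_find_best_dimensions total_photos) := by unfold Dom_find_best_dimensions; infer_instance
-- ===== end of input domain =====

-- B scans divisors downward from isqrt(n) and returns at the first one; equivalence of the return values is proved for total_photos ≥ 1.

-- ===== PORT A =====
-- loop body of A: update (best_perimeter, best_dimensions) when rows divides n and improves
def pvAStep (n : Int) (st : Option Int × (Int × Int)) (rows : Int) : Option Int × (Int × Int) :=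
  if PySem.Int.mod n rows = 0 then
    let columns := PySem.Int.floordiv n rows
    let perimeter := 2 * (rows + columns)
    match st.1 with
    | none => (some perimeter, (rows, columns))
    | some bp => if perimeter < bp then (some perimeter, (rows, columns)) else st
  else st

-- int(math.sqrt(n)) = Nat.sqrt n.toNat: exact for 0 ≤ n ≤ 2^31 (Dom); n < 0 raises in Python, excluded by Pre_
def find_best_dimensions (total_photos : Int) : (Int × Int) × Int :=
  let st := (PySem.List.pyRange 1 ((Nat.sqrt total_photos.toNat : Int) + 1) 1).foldl
      (pvAStep total_photos) (none, (1, total_photos))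
  -- Python returns the perimeter None only when no divisor was found (total_photos ≤ 0, excluded by Pre_)
  (st.2, st.1.getD 0)

-- ===== PORT B =====
-- Source B's countdown loop 'for rows in range(isqrt(n), 0, -1)': recursion on rows
def pvBLoop (n : Int) : Nat → (Int × Int) × Int
  | 0 => ((1, n), 0)   -- Source B falls off the loop and returns None here; unreachable for n ≥ 1 (excluded by Pre_)
  | k + 1 =>
    if PySem.Int.mod n ((k : Int) + 1) = 0 then
      let columns := PySem.Int.floordiv n ((k : Int) + 1)
      (((k : Int) + 1, columns), 2 * (((k : Int) + 1) + columns))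
    else pvBLoop n k

def find_best_dimensions_alt (total_photos : Int) : (Int × Int) × Int :=
  pvBLoop total_photos (Nat.sqrt total_photos.toNat)

-- ===== PRECONDITION & SPEC =====
-- Pre_ excludes total_photos ≤ 0: for negative input both programs raise ValueError (math.sqrt/isqrt),
-- and for 0 A returns a None perimeter (not an Int) while B returns None.
def Pre_find_best_dimensions (total_photos : Int) : Prop := 1 ≤ total_photos
instance (total_photos : Int) : Decidable (Pre_find_best_dimensions total_photos) := by unfold Pre_find_best_dimensions; infer_instance
def pvWitness_find_best_dimensions : Int := 12

def Spec_find_best_dimensions (total_photos : Int) (out : (Int × Int) × Int) : Prop := out = find_best_dimensions_alt total_photos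
instance (total_photos : Int) (out : (Int × Int) × Int) : Decidable (Spec_find_best_dimensions total_photos out) := by unfold Spec_find_best_dimensions; infer_instance

-- ===== CLAIM (what is proved, stated in full; the proofs are below) =====
def Claim_equal_find_best_dimensions : Prop := ∀ (total_photos : Int), Dom_find_best_dimensions total_photos → Pre_find_best_dimensions total_photos → Spec_find_best_dimensions total_photos (find_best_dimensions total_photos)

-- ===== LEMMAS AND PROOFS =====

-- a smaller divisor a < b ≤ √n gives a strictly larger perimeter
lemma pvPerim_lt (n a b : Int) (ha : 0 < a) (hab : a < b) (hb2 : b * b ≤ n)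
    (hda : a ∣ n) (hdb : b ∣ n) :
    2 * (b + PySem.Int.floordiv n b) < 2 * (a + PySem.Int.floordiv n a) := by
  obtain ⟨u, hu⟩ := hda
  obtain ⟨v, hv⟩ := hdb
  have hb : (0:Int) < b := lt_trans ha hab
  have hua : n / a = u := by rw [hu, Int.mul_ediv_cancel_left _ (ne_of_gt ha)]
  have hvb : n / b = v := by rw [hv, Int.mul_ediv_cancel_left _ (ne_of_gt hb)]
  rw [PySem.Int.floordiv_eq_ediv_of_pos hb, PySem.Int.floordiv_eq_ediv_of_pos ha, hua, hvb]
  have hbv : b ≤ v := by nlinarith [hv ▸ hb2]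
  have key : a * u = b * v := by rw [← hu, ← hv]
  nlinarith [mul_pos ha (sub_pos.mpr hab)]

lemma pvMain (n : Int) (_hn : 1 ≤ n) : ∀ k : Nat, 1 ≤ k → (k : Int) * (k : Int) ≤ n →
    ∃ d : Int, 1 ≤ d ∧ d ≤ (k : Int) ∧ d ∣ n ∧
      (PySem.List.pyRange 1 ((k : Int) + 1) 1).foldl (pvAStep n) (none, (1, n))
        = (some (2 * (d + PySem.Int.floordiv n d)), (d, PySem.Int.floordiv n d)) ∧
      pvBLoop n k = ((d, PySem.Int.floordiv n d), 2 * (d + PySem.Int.floordiv n d)) := by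
  intro k
  induction k with
  | zero => omega
  | succ k ih =>
    intro _ hk2
    by_cases hk1 : 1 ≤ k
    · -- k ≥ 1: split the range at k+1
      have hksq : (k : Int) * (k : Int) ≤ n := by push_cast at hk2 ⊢; nlinarith
      obtain ⟨d, hd1, hdk, hdvd, hfold, hloop⟩ := ih hk1 hksq
      have hb2 : ((k : Int) + 1) * ((k : Int) + 1) ≤ n := by push_cast at hk2; nlinarith
      have hsplit : PySem.List.pyRange 1 (((k + 1 : Nat) : Int) + 1) 1
          = PySem.List.pyRange 1 ((k : Int) + 1) 1 ++ [(k : Int) + 1] := by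
        rw [show (((k + 1 : Nat) : Int) + 1) = ((k : Int) + 1) + 1 by push_cast; ring]
        exact PySem.List.pyRange_one_succ_right (by omega)
      by_cases hdiv : PySem.Int.mod n ((k : Int) + 1) = 0
      · have hdvdb : ((k : Int) + 1) ∣ n := (PySem.Int.mod_eq_zero_iff_dvd n _).mp hdiv
        have hlt := pvPerim_lt n d ((k : Int) + 1) (by omega) (by omega) hb2 hdvd hdvdb
        refine ⟨(k : Int) + 1, by omega, by push_cast; omega, hdvdb, ?_, ?_⟩
        · rw [hsplit, List.foldl_append, hfold]
          show pvAStep n _ _ = _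
          unfold pvAStep
          rw [if_pos hdiv]
          simp only []
          rw [if_pos hlt]
        · show pvBLoop n (k + 1) = _
          unfold pvBLoop
          simp only [if_pos hdiv]
      · refine ⟨d, hd1, by push_cast at hdk ⊢; omega, hdvd, ?_, ?_⟩
        · rw [hsplit, List.foldl_append, hfold]
          show pvAStep n _ _ = _
          unfold pvAStep
          rw [if_neg hdiv]
        · show pvBLoop n (k + 1) = _
          unfold pvBLoop
          rw [if_neg hdiv]
          exact hloop
    · -- k = 0: the range is [1]
      have hk0 : k = 0 := by omega
      subst hk0
      have h1 : PySem.Int.mod n 1 = 0 := (PySem.Int.mod_eq_zero_iff_dvd n 1).mpr (one_dvd n)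
      have hfd : PySem.Int.floordiv n 1 = n := by
        rw [PySem.Int.floordiv_eq_ediv_of_pos (by omega)]; exact Int.ediv_one n
      refine ⟨1, le_refl 1, by norm_num, one_dvd n, ?_, ?_⟩
      · rw [show (((0 + 1 : Nat) : Int) + 1) = (1 : Int) + 1 by norm_num,
            PySem.List.pyRange_one_singleton]
        show pvAStep n (none, (1, n)) 1 = _
        unfold pvAStep
        rw [if_pos h1]
      · show pvBLoop n 1 = _
        unfold pvBLoop
        simp only [Nat.cast_zero, zero_add]
        rw [if_pos h1]

-- ===== VERDICT (by name: the statement is the Claim_ definition above) =====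
theorem find_best_dimensions_spec : Claim_equal_find_best_dimensions := by
  intro n _ hpre
  have hn : 1 ≤ n := hpre
  have hs1 : 1 ≤ Nat.sqrt n.toNat := by
    have h0 : 0 < n.toNat := by omega
    exact Nat.sqrt_pos.mpr h0
  have hs2 : ((Nat.sqrt n.toNat : Nat) : Int) * ((Nat.sqrt n.toNat : Nat) : Int) ≤ n := by
    have h : Nat.sqrt n.toNat * Nat.sqrt n.toNat ≤ n.toNat := by
      simpa [pow_two] using Nat.sqrt_le' n.toNat
    have h2 : ((Nat.sqrt n.toNat * Nat.sqrt n.toNat : Nat) : Int) ≤ ((n.toNat : Nat) : Int) := by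
      exact_mod_cast h
    have h3 : ((n.toNat : Nat) : Int) = n := Int.toNat_of_nonneg (by omega)
    push_cast at h2
    omega
  obtain ⟨d, _, _, _, hfold, hloop⟩ := pvMain n hn (Nat.sqrt n.toNat) hs1 hs2
  unfold Spec_find_best_dimensions find_best_dimensions find_best_dimensions_alt
  rw [hfold, hloop]
  rfl
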